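-- pv_equiv track=rewrite | github.com/jsbae-RL/ROMiserables | 03122_Ji/3주차/QnA_Ji/study_week3_A_Ji.py | solution
-- ===== SOURCE A (Python) =====
-- from collections import deque
--
-- def solution(s):
--   dq = deque(s)
--   count = 0                     # 몇 개의 부분으로 분해되었는지 저장하는 변수수
--
--   while dq:
--     if len(dq) == 1:            # 문자열이 처음부터 한글자거나, 한글자만 남았을 때
--       count += 1
--
--     x = dq.popleft()            # 첫번째 요소를 x에 저장(덱에서 삭제제)
--     count_x = 1                 # x 개수를 저장할 변수 초기화 (처음 하나가 있으니 1)
--     count_a = 0                 # x와 다른 문자 개수를 저장할 변수 초기화화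
--
--     while dq:
--       if x == dq[0]:            # 그 다음요소가 x와 같으면면
--         count_x += 1            # x 개수 +1
--         dq.popleft()            # 그리고 검사한 요소는 삭제제
--       else:
--         count_a += 1            # 그 다음요소가 x와 다르면면 a에 +1
--         dq.popleft()            # 그리고 검사한 요소 삭제
--
--       if count_x == count_a:    # 검사 후 x와 다른문자의 개수가 같으면
--         count += 1              # count 변수에 +1 하고 내부 반복문 탈출출
--         break
--       elif len(dq) == 0:        # 만약 개수가 다른데 문자열을 다 확인했다면
--         count += 1              # count 변수에 +1 하여 한덩어리임을 저장장
--   return count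
-- ===== SOURCE B (Python) =====
-- def solution(s):
--     answer = 0
--     same = 0
--     diff = 0
--     first = ''
--     for c in s:
--         if same == diff:
--             answer += 1
--             first = c
--             same = 0
--             diff = 0
--         if c == first:
--             same += 1
--         else:
--             diff += 1
--     return answer
-- ===== Notes on version B (the rewrite author's own statement) =====
-- stated objective: faster
-- what changed: Replaced the deque with nested consume-loops and close-of-segment counting by a single forward scan with two counters that counts each segment when it opens (same==diff); the constant-factor win comes from dropping the deque construction and per-character popleft/indexing.
import Mathlib
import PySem

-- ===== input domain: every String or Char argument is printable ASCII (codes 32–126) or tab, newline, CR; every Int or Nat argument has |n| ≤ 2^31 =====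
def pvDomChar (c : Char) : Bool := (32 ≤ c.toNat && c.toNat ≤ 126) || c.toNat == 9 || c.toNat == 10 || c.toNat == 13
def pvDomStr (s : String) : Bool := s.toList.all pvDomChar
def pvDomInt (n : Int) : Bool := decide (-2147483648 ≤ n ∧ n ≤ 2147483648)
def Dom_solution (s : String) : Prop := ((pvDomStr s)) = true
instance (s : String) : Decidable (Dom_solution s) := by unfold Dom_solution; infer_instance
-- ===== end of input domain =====

-- B is a one-pass two-counter rewrite of A's deque consumption; both are O(n), B is simpler.

-- ===== PORT A =====
-- inner while loop of A: pops from the deque updating count_x/count_a,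
-- returns the updated count and the remaining deque
def innerA (x : Char) : Int → Int → List Char → Int → Int × List Char
  | _, _, [], count => (count, [])
  | cx, ca, c :: rest, count =>
    let cx' := if x = c then cx + 1 else cx
    let ca' := if x = c then ca else ca + 1
    if cx' = ca' then (count + 1, rest)
    else if rest.isEmpty then (count + 1, rest)
    else innerA x cx' ca' rest count

theorem innerA_len (x : Char) (cx ca : Int) (l : List Char) (count : Int) :
    (innerA x cx ca l count).2.length ≤ l.length := by
  induction l generalizing cx ca count with
  | nil => simp [innerA]
  | cons c rest ih =>
    simp only [innerA]
    split_ifs with h1 h2 h3 h4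
    · simp
    · simp
    · exact Nat.le_succ_of_le (ih _ _ _)
    · simp
    · simp
    · exact Nat.le_succ_of_le (ih _ _ _)

-- outer while loop of A
def outerA : List Char → Int → Int
  | [], count => count
  | x :: rest, count =>
    let count1 := if (x :: rest).length = 1 then count + 1 else count
    let r := innerA x 1 0 rest count1
    outerA r.2 r.1
termination_by l _ => l.length
decreasing_by
  exact Nat.lt_succ_of_le (innerA_len _ _ _ _ _)

def solution (s : String) : Int := outerA s.toList 0

-- ===== PORT B =====
-- one step of B's for-loop over (answer, same, diff, first)
def stepB (st : Int × Int × Int × Char) (c : Char) : Int × Int × Int × Char :=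
  let (ans, same, diff, first) := st
  let (ans, same, diff, first) :=
    if same = diff then (ans + 1, (0 : Int), (0 : Int), c) else (ans, same, diff, first)
  if c = first then (ans, same + 1, diff, first) else (ans, same, diff + 1, first)

-- Python's initial first = '' is a string; it is only compared before any segment is
-- open (same == diff == 0), where the branch result is discarded, so any Char works.
def solution_alt (s : String) : Int :=
  (s.toList.foldl stepB ((0 : Int), (0 : Int), (0 : Int), ' ')).1

-- ===== PRECONDITION & SPEC =====
def Spec_solution (s : String) (out : Int) : Prop := out = solution_alt s
instance (s : String) (out : Int) : Decidable (Spec_solution s out) := by unfold Spec_solution; infer_instance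

-- ===== CLAIM (what is proved, stated in full; the proofs are below) =====
def Claim_equal_solution : Prop := ∀ (s : String), Dom_solution s → Spec_solution s (solution s)

-- ===== LEMMAS AND PROOFS =====

-- combined invariant, by strong induction on the length of the remaining list:
-- (1) from a balanced state (same = diff) B's fold computes A's outer loop;
-- (2) from an unbalanced state (cx ≠ ca) on a nonempty list, B's fold computes
--     A's inner loop followed by the outer loop on the remainder; B's answer is
--     one ahead of A's count because B counted the open segment at its start.
theorem main_lemma (n : Nat) :
    ∀ l : List Char, l.length ≤ n →
      ((∀ (ans k : Int) (f : Char), (l.foldl stepB (ans, k, k, f)).1 = outerA l ans) ∧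
       (∀ (x : Char) (cx ca ans : Int), cx ≠ ca → l ≠ [] →
          (l.foldl stepB (ans, cx, ca, x)).1 =
            outerA (innerA x cx ca l (ans - 1)).2 (innerA x cx ca l (ans - 1)).1)) := by
  induction n with
  | zero =>
    intro l hl
    have : l = [] := List.eq_nil_of_length_eq_zero (Nat.le_zero.mp hl)
    subst this
    exact ⟨fun ans k f => by simp [outerA], fun x cx ca ans _ h => absurd rfl h⟩
  | succ n ih =>
    intro l hl
    constructor
    · intro ans k f
      match l with
      | [] => simp [outerA]
      | x :: rest =>
        have hstep : stepB (ans, k, k, f) x = (ans + 1, 1, 0, x) := by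
          simp [stepB]
        rw [List.foldl_cons, hstep]
        match rest with
        | [] =>
          simp [outerA, innerA]
        | c :: rest' =>
          have hne : (1 : Int) ≠ 0 := one_ne_zero
          have hr : ((c :: rest') : List Char) ≠ [] := by simp
          have := (ih (c :: rest') (by simpa using Nat.lt_succ_iff.mp (lt_of_lt_of_le (by simp) hl))).2 x 1 0 (ans + 1) hne hr
          rw [this]
          simp only [outerA]
          have : (ans + 1 - 1) = ans := by ring
          rw [this]
          simp
    · intro x cx ca ans hne hl0
      match l with
      | [] => exact absurd rfl hl0
      | c :: rest =>
        have hrest : rest.length ≤ n := by simpa using Nat.lt_succ_iff.mp (lt_of_lt_of_le (by simp) hl)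
        have hstep : stepB (ans, cx, ca, x) c =
            (ans, (if c = x then cx + 1 else cx), (if c = x then ca else ca + 1), x) := by
          by_cases h : c = x
          · simp [stepB, hne, h]
          · simp [stepB, hne, h]
        rw [List.foldl_cons, hstep]
        have hx : (if x = c then cx + 1 else cx) = (if c = x then cx + 1 else cx) := by
          by_cases h : c = x
          · simp [h]
          · simp [h, Ne.symm h]
        have ha : (if x = c then ca else ca + 1) = (if c = x then ca else ca + 1) := by
          by_cases h : c = x
          · simp [h]
          · simp [h, Ne.symm h]
        simp only [innerA, hx, ha]
        by_cases hbal : (if c = x then cx + 1 else cx) = (if c = x then ca else ca + 1)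
        · -- segment closes here: remaining fold starts balanced
          simp only [if_pos hbal]
          have h1 : (ans - 1 + 1) = ans := by ring
          rw [h1, hbal]
          exact (ih rest hrest).1 ans _ x
        · rw [if_neg hbal]
          match rest with
          | [] =>
            simp [outerA]
          | c' :: rest' =>
            have hr : ((c' :: rest') : List Char) ≠ [] := by simp
            rw [if_neg (by simp [List.isEmpty] : ¬((c' :: rest').isEmpty = true))]
            exact (ih (c' :: rest') hrest).2 x _ _ ans hbal hr

-- ===== VERDICT (by name: the statement is the Claim_ definition above) =====
theorem solution_spec : Claim_equal_solution := by
  intro s _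
  unfold Spec_solution solution solution_alt
  exact ((main_lemma s.toList.length s.toList le_rfl).1 0 0 ' ').symm
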